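-- pv_equiv track=rewrite | github.com/kevinkovalchik/my_prosit | prysit/utils.py | peptide_parser
-- ===== SOURCE A (Python) =====
-- def peptide_parser(p):
--     p = p.replace("_", "")
--     if p[0] == "(":
--         raise ValueError("sequence starts with '('")
--     n = len(p)
--     i = 0
--     while i < n:
--         if i < n - 3 and p[i + 1] == "(":
--             j = p[i + 2 :].index(")")
--             offset = i + j + 3
--             yield p[i:offset]
--             i = offset
--         else:
--             yield p[i]
--             i += 1
-- ===== SOURCE B (Python) =====
-- def peptide_parser(p):
--     p = p.replace("_", "")
--     if p[0] == "(":
--         raise ValueError("sequence starts with '('")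
--     n = len(p)
--     token = ""
--     in_mod = False
--     for i, c in enumerate(p):
--         if in_mod:
--             token += c
--             if c == ")":
--                 yield token
--                 token = ""
--                 in_mod = False
--         elif i < n - 3 and p[i + 1] == "(":
--             token = c
--             in_mod = True
--         else:
--             yield c
--     if in_mod:
--         raise ValueError("unterminated modification")
-- ===== Notes on version B (the rewrite author's own statement) =====
-- stated objective: alternative
-- what changed: A scans with index jumps, slicing p[i:offset] and calling str.index to find each modification's closing ')'; B is a single character-by-character state machine over enumerate(p) that carries a token buffer and an in_mod flag and never slices or searches ahead.
-- outside the precondition, e.g. on peptide_parser('A(b)(cd'): A returns ['A(b)', '(', 'c', 'd'], B returns ['A(b)', '(', 'c', 'd']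
import Mathlib
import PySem

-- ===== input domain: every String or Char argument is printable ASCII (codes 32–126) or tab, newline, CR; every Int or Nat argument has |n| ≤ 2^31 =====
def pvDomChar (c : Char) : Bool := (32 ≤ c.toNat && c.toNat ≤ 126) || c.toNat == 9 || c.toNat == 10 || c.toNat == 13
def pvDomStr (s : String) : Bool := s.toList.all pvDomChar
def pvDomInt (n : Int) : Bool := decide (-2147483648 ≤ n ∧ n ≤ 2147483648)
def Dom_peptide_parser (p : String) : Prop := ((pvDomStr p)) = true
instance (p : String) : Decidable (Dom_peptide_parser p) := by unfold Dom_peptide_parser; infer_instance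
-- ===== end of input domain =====

-- B replaces A's index-jumping scan (slice + str.index per modification) with a single
-- character-by-character state machine carrying a token buffer and an in-mod flag (objective:
-- alternative decomposition, same cost). Equivalence of the RETURN value (the generated list).

-- ===== PORT A =====
-- while-loop of A as recursion on i (measure n - i); p[i:offset] ported as (q.drop i).take
-- (= PySem.List.slice q i offset by slice_natCast, indices nonneg); p[i+1] as q[i+1]?
-- (index nonneg and in range when the guard holds); str.index via PySem.List.index?
-- (none = ValueError, reached only outside Pre_, where we stop with []).
def pvA_loop (q : List Char) (n : Nat) (i : Nat) : List String :=
  if _h : i < n then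
    if i + 3 < n ∧ q[i+1]? = some '(' then
      match PySem.List.index? (q.drop (i+2)) ')' with
      | some j => String.ofList ((q.drop i).take (j + 3)) :: pvA_loop q n (i + j + 3)
      | none => []   -- Python: str.index raises ValueError (outside Pre_)
    else
      match q[i]? with
      | some c => String.ofList [c] :: pvA_loop q n (i + 1)
      | none => []   -- unreachable: i < n
  else []
  termination_by n - i
  decreasing_by all_goals omega

def peptide_parser (p : String) : List String :=
  let q := PySem.Chars.replace p.toList ['_'] []   -- p.replace("_", "")
  match q[0]? with
  | none => []                                     -- p[0] raises IndexError (outside Pre_)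
  | some c => if c = '(' then []                   -- raise ValueError (outside Pre_)
      else pvA_loop q q.length 0

-- ===== PORT B =====
-- for i, c in enumerate(p): structural recursion on the remaining chars, state (token, in_mod).
def pvB_go (q : List Char) (n : Nat) : List Char → Nat → List Char → Bool → List String
  | [], _, _, _ => []       -- if in_mod: Python B raises ValueError here (outside Pre_)
  | c :: rest, i, token, true =>
      if c = ')' then String.ofList (token ++ [c]) :: pvB_go q n rest (i+1) [] false
      else pvB_go q n rest (i+1) (token ++ [c]) true
  | c :: rest, i, _token, false =>
      if i + 3 < n ∧ q[i+1]? = some '(' then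
        pvB_go q n rest (i+1) [c] true
      else
        String.ofList [c] :: pvB_go q n rest (i+1) [] false

def peptide_parser_alt (p : String) : List String :=
  let q := PySem.Chars.replace p.toList ['_'] []
  match q[0]? with
  | none => []
  | some c => if c = '(' then []
      else pvB_go q q.length q 0 [] false

-- ===== PRECONDITION & SPEC =====
def pvQ (p : String) : List Char := PySem.Chars.replace p.toList ['_'] []

-- Pre_ excludes: q empty after removing '_' (A raises IndexError), q starting with '('
-- (A raises ValueError), and any '(' at position 1..len-3 with no ')' anywhere after it —
-- on such inputs A usually raises ValueError from str.index; on the rare ones where the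
-- scan never tests that '(' as a lookahead (e.g. "A(b)(cd") A still returns, so Pre_ is
-- slightly narrower than the raising set (cited in claim.json).
def Pre_peptide_parser (p : String) : Prop :=
  pvQ p ≠ [] ∧ (pvQ p)[0]? ≠ some '(' ∧
    ∀ k ∈ List.range (pvQ p).length, 0 < k → k + 3 ≤ (pvQ p).length → (pvQ p)[k]? = some '(' →
      ')' ∈ (pvQ p).drop (k+1)
instance (p : String) : Decidable (Pre_peptide_parser p) := by
  unfold Pre_peptide_parser; infer_instance

def pvWitness_peptide_parser : String := "AC(ox)DE"

def Spec_peptide_parser (p : String) (out : List String) : Prop := out = peptide_parser_alt p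
instance (p : String) (out : List String) : Decidable (Spec_peptide_parser p out) := by unfold Spec_peptide_parser; infer_instance

-- ===== CLAIM (what is proved, stated in full; the proofs are below) =====
def Claim_equal_peptide_parser : Prop := ∀ (p : String), Dom_peptide_parser p → Pre_peptide_parser p → Spec_peptide_parser p (peptide_parser p)

-- ===== LEMMAS AND PROOFS =====

-- The scan condition of Pre_ on the char list.
def pvGood (q : List Char) : Prop :=
  ∀ k, k < q.length → 0 < k → k + 3 ≤ q.length → q[k]? = some '(' →
    ')' ∈ q.drop (k+1)

-- B's mod-consuming phase: from position i, with the first ')' at offset d, it emits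
-- token ++ q[i:i+d+1] and resumes in ground state at i+d+1.
lemma pvB_modrun (q : List Char) (d : Nat) :
    ∀ (i : Nat) (token : List Char), i + d < q.length →
      (∀ m, m < d → q[i+m]? ≠ some ')') →
      q[i+d]? = some ')' →
      pvB_go q q.length (q.drop i) i token true =
        String.ofList (token ++ (q.drop i).take (d+1)) ::
          pvB_go q q.length (q.drop (i+d+1)) (i+d+1) [] false := by
  induction d with
  | zero =>
    intro i token hlt _hne hcl
    have hdrop : q.drop i = q[i] :: q.drop (i+1) :=
      (List.getElem_cons_drop (by omega)).symm
    have hc : q[i] = ')' := by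
      have := (List.getElem?_eq_some_iff.mp (by simpa using hcl)).2; exact this
    rw [hdrop]
    simp [pvB_go, hc]
  | succ d ih =>
    intro i token hlt hne hcl
    have hi : i < q.length := by omega
    have hdrop : q.drop i = q[i] :: q.drop (i+1) :=
      (List.getElem_cons_drop (by omega)).symm
    have hc : q[i] ≠ ')' := by
      have h0 := hne 0 (by omega)
      simp only [Nat.add_zero] at h0
      intro hcontra
      exact h0 (List.getElem?_eq_some_iff.mpr ⟨hi, hcontra⟩)
    have hrec := ih (i+1) (token ++ [q[i]]) (by omega)
      (by
        intro m hm
        have h := hne (m+1) (by omega)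
        rwa [show i + (m+1) = i + 1 + m by omega] at h)
      (by
        have h := hcl
        rwa [show i + (d+1) = i + 1 + d by omega] at h)
    rw [hdrop]
    simp only [pvB_go, if_neg hc]
    rw [hrec, List.take_succ_cons,
      show i + 1 + d + 1 = i + (d+1) + 1 by omega]
    simp

-- Main invariant: from any ground state i, A's jumping loop and B's state machine agree
-- (induction on the fuel bound N ≥ q.length - i).
lemma pvAB_eq (q : List Char) (hq : pvGood q) :
    ∀ N i, q.length - i ≤ N →
      pvA_loop q q.length i = pvB_go q q.length (q.drop i) i [] false := by
  intro N
  induction N with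
  | zero =>
    intro i hN
    have hge : q.length ≤ i := by omega
    rw [pvA_loop, List.drop_eq_nil_of_le hge]
    simp [pvB_go, Nat.not_lt.mpr hge]
  | succ N ih =>
    intro i hN
    by_cases hi : i < q.length
    · have hdrop : q.drop i = q[i] :: q.drop (i+1) :=
        (List.getElem_cons_drop (by omega)).symm
      by_cases hg : i + 3 < q.length ∧ q[i+1]? = some '('
      · -- modification group starts after q[i]
        obtain ⟨hg1, hg2⟩ := hg
        have hi1 : i + 1 < q.length := by omega
        have hqi1 : q[i+1] = '(' := (List.getElem?_eq_some_iff.mp hg2).2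
        have hmem : ')' ∈ q.drop (i+2) := by
          have := hq (i+1) hi1 (by omega) (by omega) hg2
          simpa [show i + 1 + 1 = i + 2 by omega] using this
        obtain ⟨j, hidx⟩ := Option.isSome_iff_exists.mp
          ((PySem.List.index?_isSome_iff _ _).mpr hmem)
        obtain ⟨hjlt, hjeq, hjmin⟩ := PySem.List.getElem_of_index?_eq_some hidx
        have hjlt' : i + 2 + j < q.length := by
          have := hjlt; simp [List.length_drop] at this; omega
        have hjq : q[i+2+j]? = some ')' := by
          refine List.getElem?_eq_some_iff.mpr ⟨hjlt', ?_⟩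
          rw [← hjeq, List.getElem_drop]
        -- A's step
        rw [pvA_loop, dif_pos hi, if_pos ⟨hg1, hg2⟩, hidx]
        -- B's step
        rw [hdrop]
        simp only [pvB_go]
        rw [if_pos ⟨hg1, hg2⟩]
        rw [pvB_modrun q (j+1) (i+1) [q[i]] (by omega)
          (by
            intro m hm
            match m with
            | 0 =>
              simp only [Nat.add_zero]
              rw [List.getElem?_eq_some_iff.mpr ⟨hi1, hqi1⟩]
              decide
            | Nat.succ m' =>
              have hmin := hjmin m' (by omega)
              rw [List.getElem_drop] at hmin
              rw [show i + 1 + (m'+1) = i + 2 + m' by omega]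
              intro hcontra
              exact hmin (List.getElem?_eq_some_iff.mp hcontra).2
          )
          (by rwa [show i + 1 + (j+1) = i + 2 + j by omega])]
        rw [List.take_succ_cons,
          show i + 1 + (j+1) + 1 = i + j + 3 by omega,
          ih (i + j + 3) (by omega)]
        simp [show j + 1 + 1 = j + 2 by omega]
      · -- single residue q[i]
        rw [pvA_loop, dif_pos hi, if_neg hg]
        have hqi : q[i]? = some q[i] := List.getElem?_eq_some_iff.mpr ⟨hi, rfl⟩
        rw [hqi, hdrop]
        simp only [pvB_go]
        rw [if_neg hg, ih (i+1) (by omega)]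
    · have hge : q.length ≤ i := by omega
      rw [pvA_loop, List.drop_eq_nil_of_le hge]
      simp [pvB_go, hi]

-- ===== VERDICT (by name: the statement is the Claim_ definition above) =====
theorem peptide_parser_spec : Claim_equal_peptide_parser := by
  intro p _hDom hPre
  unfold Spec_peptide_parser peptide_parser peptide_parser_alt
  obtain ⟨hne, h0, hgood⟩ := hPre
  unfold pvQ at hne h0 hgood
  cases hq0 : (PySem.Chars.replace p.toList ['_'] [])[0]? with
  | none =>
    exfalso
    apply hne
    have := List.getElem?_eq_none_iff.mp hq0
    exact List.eq_nil_of_length_eq_zero (by omega)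
  | some c =>
    by_cases hc : c = '('
    · exfalso; apply h0; rw [hq0, hc]
    · simp only [hq0, if_neg hc]
      have := pvAB_eq (PySem.Chars.replace p.toList ['_'] [])
        (fun k hk => hgood k (List.mem_range.mpr hk))
        (PySem.Chars.replace p.toList ['_'] []).length 0 (by omega)
      simpa using this
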